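-- pv_equiv track=rewrite | github.com/ankit-tyagi/Coding-Practise | Python/Doge GFG.py | doge_count
-- ===== SOURCE A (Python) =====
-- def doge_count(str):
--   if(len(str)<4):
--     return 0
--   count=0
--   for i in range(0,len(str)-3,1):
--     if(str[i:i+2]=="do" and str[i+2]>='a' and str[i+2]<='z' and str[i+3]=='e'):
--       count+=1
--   return count
-- ===== SOURCE B (Python) =====
-- def doge_count(str):
--     count = 0
--     i = str.find("do")
--     while i != -1:
--         if i + 4 <= len(str) and 'a' <= str[i + 2] <= 'z' and str[i + 3] == 'e':
--             count += 1
--         i = str.find("do", i + 1)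
--     return count
-- ===== Notes on version B (the rewrite author's own statement) =====
-- stated objective: faster
-- what changed: Replaced the per-index window scan with a search-driven loop that jumps between successive 'do' anchors via str.find(start) and validates only the two characters after each anchor; correct because every counted position must start with 'do' and 'do' occurrences cannot overlap.
import Mathlib
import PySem

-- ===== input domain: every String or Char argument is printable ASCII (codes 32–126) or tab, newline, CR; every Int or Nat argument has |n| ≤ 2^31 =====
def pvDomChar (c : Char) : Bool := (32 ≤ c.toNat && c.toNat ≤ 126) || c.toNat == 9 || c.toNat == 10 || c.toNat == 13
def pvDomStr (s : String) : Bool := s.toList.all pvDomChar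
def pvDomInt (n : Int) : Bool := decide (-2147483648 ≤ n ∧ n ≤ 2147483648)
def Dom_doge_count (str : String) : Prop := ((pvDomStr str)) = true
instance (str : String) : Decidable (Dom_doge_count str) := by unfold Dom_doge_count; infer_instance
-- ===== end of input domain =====

-- B replaces A's per-index window scan by a loop that jumps between 'do' anchors with str.find(start) and checks the two following characters; alternative algorithm, same O(n) cost.


-- ===== PORT A =====
def doge_count (str : String) : Int :=
  let l := str.toList
  if (l.length : Int) < 4 then 0
  else
    (PySem.List.pyRange 0 ((l.length : Int) - 3) 1).foldl
      (fun count i =>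
        if PySem.List.slice l (some i) (some (i + 2)) = ['d', 'o'] ∧
           'a' ≤ PySem.List.pyGetD l (i + 2) ' ' ∧
           PySem.List.pyGetD l (i + 2) ' ' ≤ 'z' ∧
           PySem.List.pyGetD l (i + 3) ' ' = 'e'
        then count + 1 else count) 0

-- ===== PORT B =====
-- B's while loop: i jumps between successive 'do' occurrences found by str.find;
-- the fuel argument (= len+1, an upper bound on the number of finds) only makes the
-- recursion total.  s[i+2], s[i+3] are only read under the guard i+4 <= len, where
-- pyGetD with a default is exact.
def dogeLoop (s : List Char) : Nat → Int → Int → Int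
  | 0, count, _ => count
  | fuel + 1, count, i =>
    if i = -1 then count
    else
      dogeLoop s fuel
        (if i + 4 ≤ (s.length : Int) ∧
            'a' ≤ PySem.List.pyGetD s (i + 2) ' ' ∧
            PySem.List.pyGetD s (i + 2) ' ' ≤ 'z' ∧
            PySem.List.pyGetD s (i + 3) ' ' = 'e'
         then count + 1 else count)
        (PySem.Chars.findFrom s ['d', 'o'] (i + 1))

def doge_count_alt (str : String) : Int :=
  dogeLoop str.toList (str.toList.length + 1) 0 (PySem.Str.find str "do")

-- ===== PRECONDITION & SPEC =====
def Spec_doge_count (str : String) (out : Int) : Prop := out = doge_count_alt str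
instance (str : String) (out : Int) : Decidable (Spec_doge_count str out) := by unfold Spec_doge_count; infer_instance

-- ===== CLAIM (what is proved, stated in full; the proofs are below) =====
def Claim_equal_doge_count : Prop := ∀ (str : String), Dom_doge_count str → Spec_doge_count str (doge_count str)

-- ===== LEMMAS AND PROOFS =====

/-- Does the 'do<lower>e' pattern start at the head of the list? -/
def match4 : List Char → Bool
  | a :: b :: c :: d :: _ =>
      decide (a = 'd' ∧ b = 'o' ∧ 'a' ≤ c ∧ c ≤ 'z' ∧ d = 'e')
  | _ => false

/-- Reference count: number of positions where the pattern starts. -/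
def cntPat : List Char → Nat
  | [] => 0
  | x :: t => (if match4 (x :: t) then 1 else 0) + cntPat t

def patB (l : List Char) (k : Nat) : Bool :=
  decide ((l.drop k).take 2 = ['d', 'o'] ∧
    'a' ≤ l.getD (k + 2) ' ' ∧ l.getD (k + 2) ' ' ≤ 'z' ∧ l.getD (k + 3) ' ' = 'e')

lemma patB_cons_succ (x : Char) (t : List Char) (k : Nat) :
    patB (x :: t) (k + 1) = patB t k := by
  simp [patB, Nat.add_right_comm _ 1]

lemma a_eq_cnt (l : List Char) :
    (List.range (l.length - 3)).countP (fun k => patB l k) = cntPat l := by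
  induction l with
  | nil => rfl
  | cons x t ih =>
      rcases t with _ | ⟨b, _ | ⟨c, _ | ⟨d, rest⟩⟩⟩
      · simp [cntPat, match4]
      · simp [cntPat, match4]
      · simp [cntPat, match4]
      · have hlen : (x :: b :: c :: d :: rest).length - 3
            = ((b :: c :: d :: rest).length - 3) + 1 := by simp
        rw [hlen, List.range_succ_eq_map, List.countP_cons, List.countP_map]
        have hsh : ((fun k => patB (x :: b :: c :: d :: rest) k) ∘ Nat.succ)
            = fun k => patB (b :: c :: d :: rest) k := by
          funext k
          simp [Function.comp, Nat.succ_eq_add_one, patB_cons_succ]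
        rw [hsh, ih]
        have h0 : patB (x :: b :: c :: d :: rest) 0
            = match4 (x :: b :: c :: d :: rest) := by
          simp [patB, match4, Bool.and_assoc]
        rw [h0]
        conv_rhs => rw [cntPat]
        cases match4 (x :: b :: c :: d :: rest)
        · simp
        · simp
          omega

lemma patB_int (l : List Char) (k : Nat) :
    decide (PySem.List.slice l (some (k : Int)) (some ((k : Int) + 2)) = ['d', 'o'] ∧
     'a' ≤ PySem.List.pyGetD l ((k : Int) + 2) ' ' ∧
     PySem.List.pyGetD l ((k : Int) + 2) ' ' ≤ 'z' ∧
     PySem.List.pyGetD l ((k : Int) + 3) ' ' = 'e') = patB l k := by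
  have h2 : (k : Int) + 2 = ((k + 2 : Nat) : Int) := by push_cast; ring
  have h3 : (k : Int) + 3 = ((k + 3 : Nat) : Int) := by push_cast; ring
  have hs : PySem.List.slice l (some (k : Int)) (some ((k : Int) + 2))
      = (l.drop k).take 2 := by
    rw [h2, PySem.List.slice_natCast]
    congr 1
    omega
  rw [hs, h2, h3, PySem.List.pyGetD_natCast, PySem.List.pyGetD_natCast]
  rfl

/-- A's result equals the reference count. -/
lemma a_eq_cntPat (str : String) : doge_count str = (cntPat str.toList : Int) := by
  unfold doge_count
  simp only []
  set l := str.toList with hl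
  rw [PySem.List.foldl_ite_add_one]
  by_cases h4 : (l.length : Int) < 4
  · rw [if_pos h4]
    have hle : l.length < 4 := by exact_mod_cast h4
    have hz : cntPat l = 0 := by
      rcases l with _ | ⟨a, _ | ⟨b, _ | ⟨c, _ | ⟨d, t⟩⟩⟩⟩
      · rfl
      · simp [cntPat, match4]
      · simp [cntPat, match4]
      · simp [cntPat, match4]
      · exact absurd hle (by simp)
    rw [hz]
    simp
  · rw [if_neg h4, PySem.List.pyRange_one, List.countP_map]
    have hn : ((l.length : Int) - 3 - 0).toNat = l.length - 3 := by omega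
    simp only [zero_add]
    rw [hn, ← a_eq_cnt, Nat.cast_inj]
    apply List.countP_congr
    intro k _
    simp only [Function.comp_apply, patB_int l k]

/-- cntPat of a list with no 'do' occurrence is 0. -/
lemma cntPat_eq_zero_of_no_do (l : List Char) (h : ¬ ['d', 'o'] <:+: l) : cntPat l = 0 := by
  induction l with
  | nil => rfl
  | cons x t ih =>
      have hm : match4 (x :: t) = false := by
        rcases t with _ | ⟨b, _ | ⟨c, _ | ⟨d, r⟩⟩⟩
        · simp [match4]
        · simp [match4]
        · simp [match4]
        · by_contra hb
          rw [Bool.not_eq_false, match4, decide_eq_true_iff] at hb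
          exact h ⟨[], c :: d :: r, by simp [hb.1, hb.2.1]⟩
      have ht0 : cntPat t = 0 := ih (fun hinf => h (hinf.trans (List.suffix_cons x t).isInfix))
      simp [cntPat, hm, ht0]

/-- One step of cntPat on a suffix. -/
lemma cntPat_drop_step (l : List Char) (k : Nat) (hk : k < l.length) :
    cntPat (l.drop k) = (if match4 (l.drop k) then 1 else 0) + cntPat (l.drop (k + 1)) := by
  rw [List.drop_eq_getElem_cons hk, cntPat, ← List.drop_eq_getElem_cons hk]

/-- match4 at positions without a 'do' prefix is false. -/
lemma match4_false_of_no_do (l : List Char) (j : Nat) (h : ¬ ['d', 'o'] <+: l.drop j) :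
    match4 (l.drop j) = false := by
  rcases hd : l.drop j with _ | ⟨a, _ | ⟨b, _ | ⟨c, _ | ⟨d, r⟩⟩⟩⟩ <;> simp only [match4, decide_eq_false_iff_not, not_and]
  intro ha hb
  exact absurd (by rw [hd, ha, hb]; exact ⟨c :: d :: r, rfl⟩) h

/-- Skipping positions with no 'do' prefix does not change the suffix count. -/
lemma cntPat_drop_skip (l : List Char) (k m : Nat) (hkm : k ≤ m) (hm : m ≤ l.length)
    (h : ∀ j, k ≤ j → j < m → ¬ ['d', 'o'] <+: l.drop j) :
    cntPat (l.drop k) = cntPat (l.drop m) := by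
  induction m with
  | zero =>
      have : k = 0 := by omega
      rw [this]
  | succ n ihn =>
      rcases Nat.eq_or_lt_of_le hkm with heq | hlt
      · rw [heq]
      · have hrec := ihn (by omega) (by omega) (fun j hj1 hj2 => h j hj1 (by omega))
        rw [hrec, cntPat_drop_step l n (by omega),
          match4_false_of_no_do l n (h n (by omega) (by omega))]
        simp

/-- Under a known 'do' prefix at m, B's guard condition is exactly match4 there. -/
lemma cond_iff_match4 (l : List Char) (m : Nat) (hpre : ['d', 'o'] <+: l.drop m) :
    ((m : Int) + 4 ≤ (l.length : Int) ∧
      'a' ≤ PySem.List.pyGetD l ((m : Int) + 2) ' ' ∧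
      PySem.List.pyGetD l ((m : Int) + 2) ' ' ≤ 'z' ∧
      PySem.List.pyGetD l ((m : Int) + 3) ' ' = 'e')
    ↔ match4 (l.drop m) = true := by
  have h2 : (m : Int) + 2 = ((m + 2 : Nat) : Int) := by push_cast; ring
  have h3 : (m : Int) + 3 = ((m + 3 : Nat) : Int) := by push_cast; ring
  rw [h2, h3, PySem.List.pyGetD_natCast, PySem.List.pyGetD_natCast]
  obtain ⟨r, hr⟩ := hpre
  have hlen : l.length - m = ((l.drop m).length) := by simp
  have hg2 : l.getD (m + 2) ' ' = (l.drop m).getD 2 ' ' := by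
    simp [List.getD_eq_getElem?_getD, List.getElem?_drop]
  have hg3 : l.getD (m + 3) ' ' = (l.drop m).getD 3 ' ' := by
    simp [List.getD_eq_getElem?_getD, List.getElem?_drop]
  rcases r with _ | ⟨c, _ | ⟨e, rest⟩⟩
  · constructor
    · rintro ⟨h4, -⟩
      exfalso
      have : (l.drop m).length = 2 := by rw [← hr]; rfl
      omega
    · intro hm4
      rw [← hr] at hm4
      simp [match4] at hm4
  · constructor
    · rintro ⟨h4, -⟩
      exfalso
      have : (l.drop m).length = 3 := by rw [← hr]; rfl
      omega
    · intro hm4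
      rw [← hr] at hm4
      simp [match4] at hm4
  · have hL : (l.drop m).length = 4 + rest.length := by rw [← hr]; simp; ring
    have h4 : (m : Int) + 4 ≤ (l.length : Int) := by
      have : m + 4 ≤ l.length := by omega
      exact_mod_cast this
    rw [hg2, hg3, ← hr]
    simp [match4, h4]

/-- Main loop invariant: starting the search at k, B's loop adds the suffix count from k. -/
lemma loop_eq (l : List Char) (fuel : Nat) :
    ∀ (k : Nat) (count : Int), k ≤ l.length → l.length + 1 - k ≤ fuel →
    dogeLoop l fuel count (PySem.Chars.findFrom l ['d', 'o'] (k : Int))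
      = count + (cntPat (l.drop k) : Int) := by
  induction fuel with
  | zero => intro k count hk hf; omega
  | succ f ih =>
      intro k count hk hf
      by_cases hi : PySem.Chars.findFrom l ['d', 'o'] (k : Int) = -1
      · rw [hi]
        have hno := (PySem.Chars.findFrom_natCast_eq_neg_one_iff l ['d', 'o'] k hk).mp hi
        rw [cntPat_eq_zero_of_no_do (l.drop k) hno]
        simp [dogeLoop]
      · obtain ⟨h1, h2, h3⟩ := PySem.Chars.findFrom_natCast_spec l ['d', 'o'] k hk hi
        set i := PySem.Chars.findFrom l ['d', 'o'] (k : Int) with hidef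
        have hi0 : (0 : Int) ≤ i := le_trans (by exact_mod_cast Int.natCast_nonneg k) h1
        set m := i.toNat with hmdef
        have him : i = (m : Int) := (Int.toNat_of_nonneg hi0).symm
        have hkm : k ≤ m := by omega
        have hml : m + 2 ≤ l.length := by
          have hlen2 := h2.length_le
          simp at hlen2
          omega
        rw [dogeLoop, if_neg hi]
        have hi1 : i + 1 = ((m + 1 : Nat) : Int) := by rw [him]; push_cast; ring
        rw [hi1, ih (m + 1) _ (by omega) (by omega)]
        have hskip : cntPat (l.drop k) = cntPat (l.drop m) :=
          cntPat_drop_skip l k m hkm (by omega) (fun j hj1 hj2 => h3 j hj1 hj2)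
        have hstep := cntPat_drop_step l m (by omega)
        have hcond := cond_iff_match4 l m h2
        rw [him, hskip, hstep]
        by_cases hm4 : match4 (l.drop m) = true
        · rw [if_pos (hcond.mpr hm4), hm4]
          simp
          ring
        · rw [if_neg (fun hc => hm4 (hcond.mp hc)), Bool.not_eq_true] at *
          rw [hm4]
          simp

-- ===== VERDICT (by name: the statement is the Claim_ definition above) =====
theorem doge_count_spec : Claim_equal_doge_count := by
  intro str _
  unfold Spec_doge_count doge_count_alt
  rw [a_eq_cntPat]
  have hfind : PySem.Str.find str "do"
      = PySem.Chars.findFrom str.toList ['d', 'o'] ((0 : Nat) : Int) := by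
    rw [Nat.cast_zero, PySem.Chars.findFrom_zero]
    simp
  rw [hfind, loop_eq str.toList (str.toList.length + 1) 0 0 (by omega) (by omega)]
  simp
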